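-- pv_equiv track=rewrite | github.com/jaufderheide/torosphere | mesh_3d.py | segment_row_ranges
-- ===== SOURCE A (Python) =====
-- def segment_row_ranges(n_arc: int) -> list[tuple[str, int, int]]:
--     """Return the profile row index range for each of the 8 cross-section segments.
--
--     Used by the visualization layer to colour-code the 3D surface by zone —
--     each segment is plotted as a separate plot_surface call with its own colour,
--     mirroring the colour scheme of the 2D validation plot.
--
--     Parameters
--     ----------
--     n_arc : int
--         Arc samples per segment — must equal the value passed as ``n_meridional``
--         to ``build_head_mesh`` / ``build_cross_section``.
--
--     Returns
--     -------
--     list of (name, start_row, end_row) tuples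
--         ``start_row`` : first row index for this zone in the mesh grid.
--         ``end_row``   : last row index (inclusive).
--         Slice the mesh as ``X[start_row : end_row + 1, :]`` for plot_surface.
--         Adjacent zones share a boundary row, giving seamless coverage with
--         no gaps or overlaps between zone colours.
--
--     How the index map is derived
--     ----------------------------
--     ``build_cross_section`` assembles the profile by concatenating segment
--     arrays with de-duplication (each segment drops its last point, except the
--     final apex-flat segment which keeps both points, plus one closing point).
--
--     Cumulative start positions in the resulting profile array:
--
--     +--------------------------+-------------------+------------------+
--     | Segment                  | Start index       | Point count      |
--     +==========================+===================+==================+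
--     | 1. Inner crown arc       | 0                 | n_arc − 1        |
--     | 2. Inner knuckle arc     | n_arc − 1         | n_arc − 1        |
--     | 3. Inner straight flange | 2·n_arc − 2       | 1                |
--     | 4. Bottom rim            | 2·n_arc − 1       | 1                |
--     | 5. Outer straight flange | 2·n_arc           | 1                |
--     | 6. Outer knuckle arc     | 2·n_arc + 1       | n_arc − 1        |
--     | 7. Outer crown arc       | 3·n_arc           | n_arc − 1        |
--     | 8. Apex flat             | 4·n_arc − 1       | 2                |
--     | Closing point            | 4·n_arc + 1       | 1                |
--     +--------------------------+-------------------+------------------+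
--
--     Total profile points = 4·n_arc + 2  (e.g. 258 for n_arc = 64).
--     """
--     # Start index of each segment (see table above)
--     starts = [
--         0,               # seg 1: inner crown arc
--         n_arc - 1,       # seg 2: inner knuckle arc
--         2 * n_arc - 2,   # seg 3: inner straight flange
--         2 * n_arc - 1,   # seg 4: bottom rim
--         2 * n_arc,       # seg 5: outer straight flange
--         2 * n_arc + 1,   # seg 6: outer knuckle arc
--         3 * n_arc,       # seg 7: outer crown arc
--         4 * n_arc - 1,   # seg 8: apex flat
--     ]
--     names = [
--         "Inner crown arc",
--         "Inner knuckle arc",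
--         "Inner straight flange",
--         "Bottom rim",
--         "Outer straight flange",
--         "Outer knuckle arc",
--         "Outer crown arc",
--         "Apex flat",
--     ]
--     n_last = 4 * n_arc + 1   # index of the closing (last) point
--
--     result = []
--     for i, (name, start) in enumerate(zip(names, starts)):
--         end = starts[i + 1] if i < len(starts) - 1 else n_last
--         result.append((name, start, end))
--     return result
-- ===== SOURCE B (Python) =====
-- def segment_row_ranges(n_arc: int) -> list[tuple[str, int, int]]:
--     spans = [
--         ("Inner crown arc", n_arc - 1),
--         ("Inner knuckle arc", n_arc - 1),
--         ("Inner straight flange", 1),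
--         ("Bottom rim", 1),
--         ("Outer straight flange", 1),
--         ("Outer knuckle arc", n_arc - 1),
--         ("Outer crown arc", n_arc - 1),
--         ("Apex flat", 2),
--     ]
--     result = []
--     cur = 0
--     for name, span in spans:
--         result.append((name, cur, cur + span))
--         cur += span
--     return result
-- ===== Notes on version B (the rewrite author's own statement) =====
-- stated objective: alternative
-- what changed: B replaces A's table of absolute start indices plus a peek at the next segment's start with a running cumulative index (prefix scan) over per-zone span counts, appending (name, cur, cur+span) and advancing cur.
import Mathlib
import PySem

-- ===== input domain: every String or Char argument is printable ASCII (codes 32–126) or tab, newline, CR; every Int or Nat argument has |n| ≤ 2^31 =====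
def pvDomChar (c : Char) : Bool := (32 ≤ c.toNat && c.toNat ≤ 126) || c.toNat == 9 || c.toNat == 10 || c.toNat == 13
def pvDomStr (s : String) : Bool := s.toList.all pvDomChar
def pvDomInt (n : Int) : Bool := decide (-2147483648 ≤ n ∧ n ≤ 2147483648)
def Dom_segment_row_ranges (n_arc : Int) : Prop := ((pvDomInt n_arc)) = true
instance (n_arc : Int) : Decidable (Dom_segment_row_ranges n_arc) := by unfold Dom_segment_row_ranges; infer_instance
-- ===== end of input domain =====

-- B replaces A's table of absolute start indices plus a peek at the next start by a running
-- cumulative index over per-zone spans (a prefix scan); same output, different decomposition.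

-- ===== PORT A =====
-- literal port: starts/names tables, then a loop over enumerate(zip(names, starts)) that
-- peeks at starts[i+1] (always in range under the guard, so the pyGetD default is never used)
def segment_row_ranges (n_arc : Int) : List (String × Int × Int) :=
  let starts : List Int :=
    [0, n_arc - 1, 2 * n_arc - 2, 2 * n_arc - 1, 2 * n_arc,
     2 * n_arc + 1, 3 * n_arc, 4 * n_arc - 1]
  let names : List String :=
    ["Inner crown arc", "Inner knuckle arc", "Inner straight flange", "Bottom rim",
     "Outer straight flange", "Outer knuckle arc", "Outer crown arc", "Apex flat"]
  let n_last : Int := 4 * n_arc + 1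
  (PySem.List.enumerate (names.zip starts)).foldl
    (fun result p =>
      let i := p.1
      let name := p.2.1
      let start := p.2.2
      let e : Int :=
        if i < (starts.length : Int) - 1 then PySem.List.pyGetD starts (i + 1) 0 else n_last
      result ++ [(name, start, e)]) []

-- ===== PORT B =====
def segment_row_ranges_alt (n_arc : Int) : List (String × Int × Int) :=
  let spans : List (String × Int) :=
    [("Inner crown arc", n_arc - 1), ("Inner knuckle arc", n_arc - 1),
     ("Inner straight flange", 1), ("Bottom rim", 1), ("Outer straight flange", 1),
     ("Outer knuckle arc", n_arc - 1), ("Outer crown arc", n_arc - 1), ("Apex flat", 2)]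
  (spans.foldl
    (fun (acc : List (String × Int × Int) × Int) ns =>
      (acc.1 ++ [(ns.1, acc.2, acc.2 + ns.2)], acc.2 + ns.2))
    ([], 0)).1

-- ===== PRECONDITION & SPEC =====
def Spec_segment_row_ranges (n_arc : Int) (out : List (String × Int × Int)) : Prop := out = segment_row_ranges_alt n_arc
instance (n_arc : Int) (out : List (String × Int × Int)) : Decidable (Spec_segment_row_ranges n_arc out) := by unfold Spec_segment_row_ranges; infer_instance

-- ===== CLAIM (what is proved, stated in full; the proofs are below) =====
def Claim_equal_segment_row_ranges : Prop := ∀ (n_arc : Int), Dom_segment_row_ranges n_arc → Spec_segment_row_ranges n_arc (segment_row_ranges n_arc)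

-- ===== LEMMAS AND PROOFS =====

-- ===== VERDICT (by name: the statement is the Claim_ definition above) =====
theorem segment_row_ranges_spec : Claim_equal_segment_row_ranges := by
  intro n _
  unfold Spec_segment_row_ranges segment_row_ranges segment_row_ranges_alt
  simp [PySem.List.enumerate, PySem.List.pyGetD, PySem.List.pyGet?, PySem.List.pyIdx?]
  refine ⟨?_, ?_⟩ <;> omega
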